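-- pv_equiv track=rewrite | github.com/mariuseb/bacsaas | code/python/cultural_tests/buildings/lib/treaData.py | getMetaDataValueStatistics
-- ===== SOURCE A (Python) =====
-- metaDataNaNs=['nan', '', 'Unknown', 'Ukn']
--
-- def getMetaDataValueStatistics(d_meta, fields, sortby='building_category'):
--     fields=[fields]
--     d={}
--     for bui in d_meta.keys():
--         sort=d_meta[bui][sortby]
--         if not sort in d.keys():
--             d[sort]={f:{} for f in fields}
--         for f in fields:
--             if f in d_meta[bui].keys() and d_meta[bui][f] not in metaDataNaNs:
--                 val=d_meta[bui][f]
--                 if val in d[sort][f].keys():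
--                     d[sort][f][val]+=1
--                 else:
--                     d[sort][f][val]=1
--             else:
--                 if 'ukn' in d[sort][f].keys():
--                     d[sort][f]['ukn']+=1
--                 else:
--                     d[sort][f]['ukn']=1
--     return d
-- ===== SOURCE B (Python) =====
-- metaDataNaNs=['nan', '', 'Unknown', 'Ukn']
--
-- def getMetaDataValueStatistics(d_meta, fields, sortby='building_category'):
--     # phase 1: flatten each building to a (category, bucket-key) pair
--     def bucket(m):
--         v = m.get(fields)
--         return 'ukn' if v is None or v in metaDataNaNs else v
--     pairs = [(m[sortby], bucket(m)) for m in d_meta.values()]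
--     # phase 2: declarative reshape: distinct categories (first-occurrence order),
--     # distinct bucket keys per category, counted over the flat pair list
--     return {s: {fields: {k: pairs.count((s, k))
--                          for k in dict.fromkeys(k2 for s2, k2 in pairs if s2 == s)}}
--             for s in dict.fromkeys(s for s, _ in pairs)}
-- ===== Notes on version B (the rewrite author's own statement) =====
-- stated objective: alternative
-- what changed: A builds the nested result in one incremental pass with in-place nested dict creation and counter updates; B is a two-phase declarative rewrite: flatten each building to a (category, bucket-key) pair, then build the nested dict by comprehensions over first-occurrence-deduplicated categories and keys, counting over the flat pair list.
import Mathlib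
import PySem

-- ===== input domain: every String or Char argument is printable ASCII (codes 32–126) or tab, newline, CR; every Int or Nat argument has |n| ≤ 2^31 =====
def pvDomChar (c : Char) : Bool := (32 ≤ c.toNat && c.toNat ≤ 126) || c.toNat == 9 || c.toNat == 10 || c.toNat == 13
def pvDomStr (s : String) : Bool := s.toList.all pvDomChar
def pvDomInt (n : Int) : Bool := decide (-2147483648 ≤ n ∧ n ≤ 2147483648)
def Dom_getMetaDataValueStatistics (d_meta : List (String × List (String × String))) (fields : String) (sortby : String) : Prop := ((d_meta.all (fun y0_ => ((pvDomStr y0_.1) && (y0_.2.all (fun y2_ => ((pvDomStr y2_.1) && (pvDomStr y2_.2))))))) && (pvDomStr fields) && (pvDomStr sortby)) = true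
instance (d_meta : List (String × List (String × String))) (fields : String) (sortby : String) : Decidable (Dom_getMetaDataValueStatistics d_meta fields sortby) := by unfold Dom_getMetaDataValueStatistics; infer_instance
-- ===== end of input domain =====

-- B replaces A's single incremental pass with nested in-place dict updates by a declarative
-- two-phase form: flatten each building to a (category, bucket) pair, then build the nested
-- result by comprehensions over deduplicated categories/keys with counts over the flat list.
-- Equivalence is about the RETURN value (A mutates only its own locals).

def metaDataNaNs : List String := ["nan", "", "Unknown", "Ukn"]

-- ===== PORT A =====
def getMetaDataValueStatistics (d_meta : List (String × List (String × String))) (fields : String) (sortby : String) : List (String × List (String × List (String × Int))) :=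
  let dm : PySem.Dict String (PySem.Dict String String) :=
    PySem.Dict.ofList (d_meta.map (fun p => (p.1, PySem.Dict.ofList p.2)))
  let fields0 : List String := [fields]            -- fields=[fields]
  let d : PySem.Dict String (PySem.Dict String (PySem.Dict String Int)) :=
    dm.keys.foldl (fun d bui =>
      let m := dm.getD bui PySem.Dict.empty        -- d_meta[bui] (bui ∈ keys, so present)
      let sort := m.getD sortby ""                 -- d_meta[bui][sortby]; KeyError excluded by Pre_
      let d := if d.contains sort then d
               else d.insert sort (fields0.foldl (fun a f => a.insert f PySem.Dict.empty) PySem.Dict.empty)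
      fields0.foldl (fun d f =>
        let inner := d.getD sort PySem.Dict.empty  -- d[sort]
        let fd := inner.getD f PySem.Dict.empty    -- d[sort][f]
        if m.contains f && !(metaDataNaNs.contains (m.getD f "")) then
          let val := m.getD f ""
          if fd.contains val then
            d.insert sort (inner.insert f (fd.insert val (fd.getD val 0 + 1)))
          else
            d.insert sort (inner.insert f (fd.insert val 1))
        else
          if fd.contains "ukn" then
            d.insert sort (inner.insert f (fd.insert "ukn" (fd.getD "ukn" 0 + 1)))
          else
            d.insert sort (inner.insert f (fd.insert "ukn" 1))) d) PySem.Dict.empty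
  d.items.map (fun se => (se.1, se.2.items.map (fun fe => (fe.1, fe.2.items))))

-- ===== PORT B =====
def getMetaDataValueStatistics_alt (d_meta : List (String × List (String × String))) (fields : String) (sortby : String) : List (String × List (String × List (String × Int))) :=
  let dm : PySem.Dict String (PySem.Dict String String) :=
    PySem.Dict.ofList (d_meta.map (fun p => (p.1, PySem.Dict.ofList p.2)))
  -- phase 1: each building becomes a (category, bucket-key) pair
  let bucket : PySem.Dict String String → String := fun m =>
    match m.get? fields with                       -- v = m.get(fields)
    | none => "ukn"
    | some v => if metaDataNaNs.contains v then "ukn" else v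
  let pairs : List (String × String) :=
    dm.values.map (fun m => (m.getD sortby "", bucket m))   -- m[sortby]; KeyError excluded by Pre_
  -- phase 2: declarative reshape over deduplicated categories and keys
  (PySem.List.dedup (pairs.map Prod.fst)).map (fun s =>
    (s, [(fields,
      (PySem.List.dedup ((pairs.filter (fun p => p.1 == s)).map Prod.snd)).map
        (fun k => (k, (pairs.count (s, k) : Int))))]))

-- ===== PRECONDITION & SPEC =====
-- Pre_ excludes exactly the inputs where some building's metadata dict lacks the sortby key:
-- there Python A raises KeyError (d_meta[bui][sortby]).
def Pre_getMetaDataValueStatistics (d_meta : List (String × List (String × String))) (fields : String) (sortby : String) : Prop :=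
  ∀ pr ∈ (PySem.Dict.ofList (d_meta.map (fun p => (p.1, PySem.Dict.ofList p.2)))).items,
    pr.2.contains sortby = true
instance (d_meta : List (String × List (String × String))) (fields : String) (sortby : String) : Decidable (Pre_getMetaDataValueStatistics d_meta fields sortby) := by unfold Pre_getMetaDataValueStatistics; infer_instance
def pvWitness_getMetaDataValueStatistics : (List (String × List (String × String))) × String × String :=
  ([("b1", [("cat", "x"), ("use", "office")]), ("b2", [("cat", "x")])], "use", "cat")

def Spec_getMetaDataValueStatistics (d_meta : List (String × List (String × String))) (fields : String) (sortby : String) (out : List (String × List (String × List (String × Int)))) : Prop := out = getMetaDataValueStatistics_alt d_meta fields sortby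
instance (d_meta : List (String × List (String × String))) (fields : String) (sortby : String) (out : List (String × List (String × List (String × Int)))) : Decidable (Spec_getMetaDataValueStatistics d_meta fields sortby out) := by unfold Spec_getMetaDataValueStatistics; infer_instance

-- ===== CLAIM (what is proved, stated in full; the proofs are below) =====
def Claim_equal_getMetaDataValueStatistics : Prop := ∀ (d_meta : List (String × List (String × String))) (fields : String) (sortby : String), Dom_getMetaDataValueStatistics d_meta fields sortby → Pre_getMetaDataValueStatistics d_meta fields sortby → Spec_getMetaDataValueStatistics d_meta fields sortby (getMetaDataValueStatistics d_meta fields sortby)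

-- ===== LEMMAS AND PROOFS =====

-- the bucket key a single building contributes (B's `bucket`, and what A's branch computes)
def pvKey (fields : String) (m : PySem.Dict String String) : String :=
  match m.get? fields with
  | none => "ukn"
  | some v => if metaDataNaNs.contains v then "ukn" else v

def pvPair (fields sortby : String) (m : PySem.Dict String String) : String × String :=
  (m.getD sortby "", pvKey fields m)

-- A's loop body, phrased on the (category, key) pair
def pvStep (fields : String) (d : PySem.Dict String (PySem.Dict String (PySem.Dict String Int))) (p : String × String) : PySem.Dict String (PySem.Dict String (PySem.Dict String Int)) :=
  let d := if d.contains p.1 then d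
           else d.insert p.1 (PySem.Dict.empty.insert fields PySem.Dict.empty)
  let inner := d.getD p.1 PySem.Dict.empty
  let fd := inner.getD fields PySem.Dict.empty
  if fd.contains p.2 then d.insert p.1 (inner.insert fields (fd.insert p.2 (fd.getD p.2 0 + 1)))
  else d.insert p.1 (inner.insert fields (fd.insert p.2 1))

-- the canonical value of A's accumulator after consuming the pair list ps
def pvCanon (fields : String) (ps : List (String × String)) : List (String × PySem.Dict String (PySem.Dict String Int)) :=
  (PySem.List.dedup (ps.map Prod.fst)).map (fun s =>
    (s, PySem.Dict.mk [(fields, PySem.Dict.mk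
      ((PySem.List.dedup ((ps.filter (fun p => p.1 == s)).map Prod.snd)).map
        (fun k => (k, (ps.count (s, k) : Int)))))]))


lemma pv_mem_filter_snd (ps : List (String × String)) (s k : String) :
    k ∈ (ps.filter (fun p => p.1 == s)).map Prod.snd ↔ (s, k) ∈ ps := by
  simp only [List.mem_map, List.mem_filter, beq_iff_eq]
  constructor
  · rintro ⟨⟨a, b⟩, ⟨hm, rfl⟩, rfl⟩; exact hm
  · intro h; exact ⟨(s, k), ⟨h, rfl⟩, rfl⟩

lemma pv_dedup_append (xs : List String) (x : String) :
    PySem.List.dedup (xs ++ [x]) = if x ∈ xs then PySem.List.dedup xs else PySem.List.dedup xs ++ [x] := by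
  rw [PySem.List.dedup_eq_ofList, PySem.List.dedup_eq_ofList, PySem.Set.ofList_append_singleton]
  split
  · exact PySem.Set.add_of_mem (by simpa [PySem.Set.mem_ofList] using ‹x ∈ xs›)
  · exact PySem.Set.add_of_not_mem (by simpa [PySem.Set.mem_ofList] using ‹¬ x ∈ xs›)

lemma pv_insert_mk_single {ν : Type} (k : String) (v w : ν) :
    (PySem.Dict.mk [(k, v)]).insert k w = PySem.Dict.mk [(k, w)] := by
  apply PySem.Dict.ext
  rw [PySem.Dict.items_insert_of_contains _ _ (by simp)]
  simp

lemma pv_count_append_ne (ps : List (String × String)) (p q : String × String) (h : p ≠ q) :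
    (ps ++ [p]).count q = ps.count q := by
  rw [List.count_append]
  simp [h]

lemma pv_entry_unchanged (ps : List (String × String)) (p : String × String) (s' : String) (h : p.1 ≠ s') :
    (PySem.List.dedup (((ps ++ [p]).filter (fun q => q.1 == s')).map Prod.snd)).map
        (fun k => (k, ((ps ++ [p]).count (s', k) : Int)))
      = (PySem.List.dedup ((ps.filter (fun q => q.1 == s')).map Prod.snd)).map
        (fun k => (k, (ps.count (s', k) : Int))) := by
  have hf : (ps ++ [p]).filter (fun q => q.1 == s') = ps.filter (fun q => q.1 == s') := by
    rw [List.filter_append]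
    simp [h]
  rw [hf]
  apply List.map_congr_left
  intro k _
  rw [pv_count_append_ne ps p (s', k) (fun e => h (by rw [e]))]

lemma pv_main (fields : String) (ps : List (String × String)) :
    (ps.foldl (pvStep fields) PySem.Dict.empty).items = pvCanon fields ps := by
  induction ps using List.reverseRecOn with
  | nil => rfl
  | append_singleton ps p ih =>
    obtain ⟨s, k⟩ := p
    rw [List.foldl_append, List.foldl_cons, List.foldl_nil]
    set D := ps.foldl (pvStep fields) PySem.Dict.empty with hD
    have hkeys : D.keys = PySem.List.dedup (ps.map Prod.fst) := by
      have h0 : D.keys = D.items.map Prod.fst := rfl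
      rw [h0, ih]
      unfold pvCanon
      rw [List.map_map]
      exact List.map_id _
    have hnd : D.keys.Nodup := by rw [hkeys]; exact PySem.List.nodup_dedup _
    have hfst : ((ps ++ [(s, k)]).map Prod.fst) = ps.map Prod.fst ++ [s] := by simp
    have hfil : (ps ++ [(s, k)]).filter (fun p => p.1 == s) = ps.filter (fun p => p.1 == s) ++ [(s, k)] := by
      rw [List.filter_append]; simp
    by_cases hs : s ∈ ps.map Prod.fst
    · -- the category s was seen before
      have hc : D.contains s = true :=
        (PySem.Dict.contains_iff_mem_keys D s).mpr (by rw [hkeys]; exact (PySem.List.mem_dedup _ _).mpr hs)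
      set old := PySem.List.dedup ((ps.filter (fun p => p.1 == s)).map Prod.snd) with hold
      set kl := old.map (fun k' => (k', (ps.count (s, k') : Int))) with hkl
      have hmemE : (s, PySem.Dict.mk [(fields, PySem.Dict.mk kl)]) ∈ D.items := by
        rw [ih]
        exact List.mem_map.mpr ⟨s, (PySem.List.mem_dedup _ _).mpr hs, rfl⟩
      have hinner : D.getD s PySem.Dict.empty = PySem.Dict.mk [(fields, PySem.Dict.mk kl)] :=
        PySem.Dict.getD_of_mem_items D hmemE hnd PySem.Dict.empty
      have hfd : (PySem.Dict.mk [(fields, PySem.Dict.mk kl)]).getD fields PySem.Dict.empty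
          = PySem.Dict.mk kl := by
        rw [PySem.Dict.getD_eq_get?_getD, PySem.Dict.get?_mk_cons]
        simp
    
      have hfdkeys : (PySem.Dict.mk kl).keys = old := by
        have h0 : (PySem.Dict.mk kl).keys = kl.map Prod.fst := rfl
        rw [h0, hkl, List.map_map]; exact List.map_id _
      have hfdnd : (PySem.Dict.mk kl).keys.Nodup := by
        rw [hfdkeys]; exact PySem.List.nodup_dedup _
      have hcontk : ((PySem.Dict.mk kl).contains k = true) ↔ (s, k) ∈ ps := by
        rw [PySem.Dict.contains_iff_mem_keys, hfdkeys, hold, PySem.List.mem_dedup,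
          pv_mem_filter_snd]
      have hded : PySem.List.dedup ((ps ++ [(s, k)]).map Prod.fst) = PySem.List.dedup (ps.map Prod.fst) := by
        rw [hfst, pv_dedup_append, if_pos hs]
      by_cases hk : (s, k) ∈ ps
      · -- the pair (s, k) was counted before: bump in place
        have hck : (PySem.Dict.mk kl).contains k = true := hcontk.mpr hk
        have hmemk : (k, (ps.count (s, k) : Int)) ∈ kl :=
          List.mem_map.mpr ⟨k, by rw [hold, PySem.List.mem_dedup, pv_mem_filter_snd]; exact hk, rfl⟩
        have hgetk : (PySem.Dict.mk kl).getD k 0 = (ps.count (s, k) : Int) :=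
          PySem.Dict.getD_of_mem_items _ hmemk hfdnd 0
        simp only [pvStep, hc, if_true, hinner, hfd, hck, hgetk]
        rw [pv_insert_mk_single, PySem.Dict.items_insert_of_contains D _ hc, ih]
        unfold pvCanon
        rw [hded, List.map_map]
        apply List.map_congr_left
        intro s' hs'
        by_cases he : s' = s
        · subst he
          simp only [Function.comp_apply, beq_self_eq_true, if_pos]
          rw [hfil, List.map_append]
          simp only [List.map_cons, List.map_nil]
          rw [pv_dedup_append, if_pos ((pv_mem_filter_snd ps s' k).mpr hk), ← hold]
          have hins : ({ items := kl } : PySem.Dict String Int).insert k ((List.count (s', k) ps : Int) + 1)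
              = PySem.Dict.mk (old.map (fun k1 => (k1, (List.count (s', k1) (ps ++ [(s', k)]) : Int)))) := by
            apply PySem.Dict.ext
            rw [PySem.Dict.items_insert_of_contains _ _ hck]
            show kl.map _ = _
            rw [hkl, List.map_map]
            apply List.map_congr_left
            intro k' hk'
            by_cases hke : k' = k
            · subst hke
              simp only [Function.comp_apply, beq_self_eq_true, if_pos]
              rw [List.count_append]
              simp
            · have hb : (k' == k) = false := by simp [hke]
              simp only [Function.comp_apply, hb, Bool.false_eq_true, if_false]
              rw [pv_count_append_ne ps (s', k) (s', k')
                (by simp only [ne_eq, Prod.mk.injEq, not_and]; exact fun _ h => hke h.symm)]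
          rw [hins]
        · have hb : (s' == s) = false := by simp [he]
          simp only [Function.comp_apply, hb, Bool.false_eq_true, if_false]
          rw [pv_entry_unchanged ps (s, k) s' (fun e => he e.symm)]
      · -- the category s exists but the key k is new in it
        have hck : ({ items := kl } : PySem.Dict String Int).contains k = false := by
          cases h : ({ items := kl } : PySem.Dict String Int).contains k
          · rfl
          · exact absurd (hcontk.mp h) hk
        simp only [pvStep, hc, if_true, hinner, hfd, hck, Bool.false_eq_true, if_false]
        rw [pv_insert_mk_single, PySem.Dict.items_insert_of_contains D _ hc, ih]
        unfold pvCanon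
        rw [hded, List.map_map]
        apply List.map_congr_left
        intro s' hs'
        by_cases he : s' = s
        · subst he
          simp only [Function.comp_apply, beq_self_eq_true, if_pos]
          rw [hfil, List.map_append]
          simp only [List.map_cons, List.map_nil]
          rw [pv_dedup_append, if_neg (fun hmem => hk ((pv_mem_filter_snd ps s' k).mp hmem)), ← hold]
          have hcnt0 : List.count (s', k) ps = 0 := List.count_eq_zero.mpr hk
          have hins : ({ items := kl } : PySem.Dict String Int).insert k 1
              = PySem.Dict.mk ((old ++ [k]).map (fun k1 => (k1, (List.count (s', k1) (ps ++ [(s', k)]) : Int)))) := by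
            apply PySem.Dict.ext
            rw [PySem.Dict.items_insert_of_not_contains _ _ hck]
            show kl ++ [(k, 1)] = _
            rw [List.map_append, hkl]
            congr 1
            · apply List.map_congr_left
              intro k' hk'
              have hkk : k ≠ k' := fun e => hk (by
                rw [e]
                exact (pv_mem_filter_snd ps s' k').mp ((PySem.List.mem_dedup _ _).mp (hold ▸ hk')))
              rw [pv_count_append_ne ps (s', k) (s', k')
                (by simp only [ne_eq, Prod.mk.injEq, not_and]; exact fun _ h => hkk h)]
            · simp only [List.map_cons, List.map_nil, List.count_append, hcnt0, Nat.zero_add]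
              simp
          rw [hins]
        · have hb : (s' == s) = false := by simp [he]
          simp only [Function.comp_apply, hb, Bool.false_eq_true, if_false]
          rw [pv_entry_unchanged ps (s, k) s' (fun e => he e.symm)]
    · -- a brand-new category
      have hc : D.contains s = false := by
        cases h : D.contains s
        · rfl
        · have hm : s ∈ PySem.List.dedup (ps.map Prod.fst) := by
            rw [← hkeys]; exact (PySem.Dict.contains_iff_mem_keys D s).mp h
          exact absurd ((PySem.List.mem_dedup _ _).mp hm) hs
      have hfil0 : ps.filter (fun p => p.1 == s) = [] := by
        rw [List.filter_eq_nil_iff]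
        intro q hq
        simp only [beq_iff_eq]
        exact fun e => hs (List.mem_map.mpr ⟨q, hq, e⟩)
      have hcnt0 : ps.count (s, k) = 0 :=
        List.count_eq_zero.mpr (fun h => hs (List.mem_map.mpr ⟨(s, k), h, rfl⟩))
      simp only [pvStep, hc, Bool.false_eq_true, if_false, PySem.Dict.getD_insert_self,
        PySem.Dict.contains_empty, PySem.Dict.insert_insert_self]
      rw [PySem.Dict.items_insert_of_not_contains D _ hc, ih]
      unfold pvCanon
      rw [hfst, pv_dedup_append, if_neg hs, List.map_append]
      congr 1
      · apply List.map_congr_left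
        intro s' hs'
        have hne : s ≠ s' := fun e => hs (e ▸ (PySem.List.mem_dedup _ _).mp hs')
        rw [pv_entry_unchanged ps (s, k) s' hne]
      · simp only [List.map_cons, List.map_nil]
        rw [hfil, hfil0]
        simp only [List.nil_append, List.map_cons, List.map_nil]
        rw [show PySem.List.dedup [k] = [k] by rw [show [k] = [] ++ [k] from rfl, pv_dedup_append]; simp]
        simp only [List.map_cons, List.map_nil, List.count_append, hcnt0, Nat.zero_add]
        simp
        rfl

lemma pv_bodyA (fields sortby : String) (m : PySem.Dict String String) (d : PySem.Dict String (PySem.Dict String (PySem.Dict String Int))) :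
    (let sort := m.getD sortby "";
     let d' := if d.contains sort then d
               else d.insert sort (([fields] : List String).foldl (fun a f => a.insert f PySem.Dict.empty) PySem.Dict.empty);
     ([fields] : List String).foldl (fun d f =>
        let inner := d.getD sort PySem.Dict.empty
        let fd := inner.getD f PySem.Dict.empty
        if m.contains f && !(metaDataNaNs.contains (m.getD f "")) then
          let val := m.getD f ""
          if fd.contains val then d.insert sort (inner.insert f (fd.insert val (fd.getD val 0 + 1)))
          else d.insert sort (inner.insert f (fd.insert val 1))
        else
          if fd.contains "ukn" then d.insert sort (inner.insert f (fd.insert "ukn" (fd.getD "ukn" 0 + 1)))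
          else d.insert sort (inner.insert f (fd.insert "ukn" 1))) d')
    = pvStep fields d (pvPair fields sortby m) := by
  simp only [List.foldl_cons, List.foldl_nil]
  unfold pvStep pvPair pvKey
  by_cases hcf : m.contains fields = true
  · obtain ⟨v, hv⟩ : ∃ v, m.get? fields = some v := by
      have := PySem.Dict.contains_eq_isSome_get? (d := m) (k := fields)
      rw [hcf] at this
      exact Option.isSome_iff_exists.mp this.symm
    have hgd : m.getD fields "" = v := PySem.Dict.getD_of_get?_eq_some m "" hv
    by_cases hnan : metaDataNaNs.contains v = true
    · have hm : v ∈ metaDataNaNs := by simpa using hnan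
      simp [hcf, hgd, hv, hm]
    · have hm : v ∉ metaDataNaNs := by simpa using hnan
      simp [hcf, hgd, hv, hm]
  · have hv : m.get? fields = none := by
      have := PySem.Dict.contains_eq_isSome_get? (d := m) (k := fields)
      rw [Bool.not_eq_true] at hcf
      rw [hcf] at this
      cases h : m.get? fields
      · rfl
      · rw [h] at this; simp at this
    have hcf' : m.contains fields = false := Bool.not_eq_true _ |>.mp hcf
    simp [hcf', hv]

theorem pv_A_eq_B (d_meta : List (String × List (String × String))) (fields : String) (sortby : String) :
    getMetaDataValueStatistics d_meta fields sortby = getMetaDataValueStatistics_alt d_meta fields sortby := by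
  simp only [getMetaDataValueStatistics, getMetaDataValueStatistics_alt]
  set dm := PySem.Dict.ofList (d_meta.map (fun p => (p.1, PySem.Dict.ofList p.2))) with hdm
  have hnd : dm.keys.Nodup := PySem.Dict.nodup_keys_ofList _
  have hitems : dm.items = dm.keys.map (fun k => (k, dm.getD k PySem.Dict.empty)) :=
    PySem.Dict.items_eq_map_keys dm hnd PySem.Dict.empty
  rw [PySem.List.foldl_congr_mem _ _
      (fun d bui => pvStep fields d (pvPair fields sortby (dm.getD bui PySem.Dict.empty))) _
      (fun acc x _ => pv_bodyA fields sortby (dm.getD x PySem.Dict.empty) acc)]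
  rw [show (dm.values = dm.items.map Prod.snd) from rfl, hitems]
  rw [List.map_map, List.map_map, ← List.foldl_map (f := fun k => pvPair fields sortby (dm.getD k PySem.Dict.empty))]
  rw [pv_main fields (dm.keys.map (fun k => pvPair fields sortby (dm.getD k PySem.Dict.empty)))]
  simp only [pvCanon, pvPair, pvKey, List.map_map, Function.comp_def]
  rfl

-- ===== VERDICT (by name: the statement is the Claim_ definition above) =====
theorem getMetaDataValueStatistics_spec : Claim_equal_getMetaDataValueStatistics := by
  intro d_meta fields sortby _ _
  exact pv_A_eq_B d_meta fields sortby
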